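-- pv_equiv track=rewrite | github.com/gcClearMind/sysml | getVab.py | changeProperty
-- ===== SOURCE A (Python) =====
-- def changeProperty(property):
--     spd = ':'
--     if spd not in property:
--         return property
--     i = 0
--     result = ''
--     while i < len(property):
--         if property[i] == spd:
--             i += 1
--             if i < len(property):
--                 result += property[i].upper()
--                 i += 1
--         else:
--             result += property[i]
--             i += 1
--     return result
-- ===== SOURCE B (Python) =====
-- import re
--
-- def changeProperty(property):
--     return re.sub(r':(.?)', lambda m: m.group(1).upper(), property)
-- ===== Notes on version B (the rewrite author's own statement) =====
-- stated objective: idiomatic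
-- what changed: Replaces A's hand-rolled index-while loop (with its separate ':' in property guard) by a single regular-expression substitution re.sub(r':(.?)', ...) that drops each colon and uppercases the captured following character.
import Mathlib
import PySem

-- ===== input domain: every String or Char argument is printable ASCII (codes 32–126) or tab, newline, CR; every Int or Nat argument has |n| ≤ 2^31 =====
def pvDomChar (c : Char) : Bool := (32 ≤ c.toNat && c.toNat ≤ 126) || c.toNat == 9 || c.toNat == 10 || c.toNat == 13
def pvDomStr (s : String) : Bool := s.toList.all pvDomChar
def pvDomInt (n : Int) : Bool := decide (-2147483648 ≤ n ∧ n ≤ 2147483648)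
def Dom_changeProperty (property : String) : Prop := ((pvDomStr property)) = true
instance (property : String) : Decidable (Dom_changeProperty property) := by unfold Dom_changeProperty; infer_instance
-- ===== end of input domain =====

-- B replaces A's guarded index-while loop by one regex substitution re.sub(r':(.?)', …): simpler/idiomatic, same values.

-- ===== PORT A =====
-- A's while loop over index i with string accumulator `result`; every access
-- property[i] in A is guarded by `i < len(property)`, so guarded indexing is exact.
def changePropertyLoop (cs : List Char) (i : Nat) (result : List Char) : List Char :=
  if h : i < cs.length then
    if cs[i] = ':' then
      if h2 : i + 1 < cs.length then
        changePropertyLoop cs (i + 2) (result ++ [(cs[i+1]).toUpper])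
      else
        changePropertyLoop cs (i + 1) result
    else
      changePropertyLoop cs (i + 1) (result ++ [cs[i]])
  else result
termination_by cs.length - i

def changeProperty (property : String) : String :=
  -- `spd not in property` with the one-char needle ':' = char membership
  if ':' ∈ property.toList then String.ofList (changePropertyLoop property.toList 0 []) else property

-- ===== PORT B =====
-- hand port of re.sub(r':(.?)', lambda m: m.group(1).upper(), property): the engine
-- scans left to right; each match consumes a ':' plus the following char (if any) and
-- is replaced by that char uppercased; unmatched chars are copied.  Exact on Dom:
-- '.' not matching '\n' only leaves a '\n' unconsumed after a ':', and it is then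
-- copied unchanged — the same output as consuming it, since '\n'.upper() == '\n'.
def changePropertySub : List Char → List Char
  | [] => []
  | c :: rest =>
    if c = ':' then
      match rest with
      | [] => []
      | d :: rest' => d.toUpper :: changePropertySub rest'
    else c :: changePropertySub rest

def changeProperty_alt (property : String) : String :=
  String.ofList (changePropertySub property.toList)

-- ===== PRECONDITION & SPEC =====
def Spec_changeProperty (property : String) (out : String) : Prop := out = changeProperty_alt property
instance (property : String) (out : String) : Decidable (Spec_changeProperty property out) := by unfold Spec_changeProperty; infer_instance

-- ===== CLAIM (what is proved, stated in full; the proofs are below) =====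
def Claim_equal_changeProperty : Prop := ∀ (property : String), Dom_changeProperty property → Spec_changeProperty property (changeProperty property)

-- ===== LEMMAS AND PROOFS =====

theorem sub_cons_ne (c : Char) (rest : List Char) (h : ¬ c = ':') :
    changePropertySub (c :: rest) = c :: changePropertySub rest := by
  cases rest <;> simp only [changePropertySub] <;> rw [if_neg h]

theorem sub_cons_colon (d : Char) (rest : List Char) :
    changePropertySub (':' :: d :: rest) = d.toUpper :: changePropertySub rest := by
  simp [changePropertySub]

-- loop invariant: A's while loop from index i produces B's substitution of the rest
theorem changePropertyLoop_eq (cs : List Char) (i : Nat) (result : List Char) :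
    changePropertyLoop cs i result = result ++ changePropertySub (cs.drop i) := by
  fun_induction changePropertyLoop cs i result
  case _ i result h h1 h2 ih =>
    rw [ih, List.drop_eq_getElem_cons h, List.drop_eq_getElem_cons h2, h1, sub_cons_colon]
    simp
  case _ i result h h1 h2 ih =>
    rw [ih, List.drop_eq_getElem_cons h, h1,
      List.drop_eq_nil_of_le (by omega : cs.length ≤ i + 1)]
    simp [changePropertySub]
  case _ i result h h1 ih =>
    rw [ih, List.drop_eq_getElem_cons h, sub_cons_ne _ _ h1]
    simp
  case _ i result h =>
    rw [List.drop_eq_nil_of_le (by omega : cs.length ≤ i)]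
    simp [changePropertySub]

-- the substitution is the identity on colon-free strings (A's early-return branch)
theorem changePropertySub_id (cs : List Char) (h : ':' ∉ cs) :
    changePropertySub cs = cs := by
  induction cs with
  | nil => rfl
  | cons c rest ih =>
    simp only [List.mem_cons, not_or] at h
    rw [sub_cons_ne c rest (fun hc => h.1 hc.symm), ih h.2]

-- ===== VERDICT (by name: the statement is the Claim_ definition above) =====
theorem changeProperty_spec : Claim_equal_changeProperty := by
  intro property _
  unfold Spec_changeProperty changeProperty changeProperty_alt
  split_ifs with h
  · rw [changePropertyLoop_eq]
    simp
  · rw [changePropertySub_id _ h]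
    exact String.ofList_toList.symm
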